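-- pv_equiv track=rewrite | github.com/miguel104829/Ejercicios-Python | reto_1.py | dfs
-- ===== SOURCE A (Python) =====
-- def dfs(graph, start, end, path=""):
--     path += start + " "
--     if start == end:
--         return path.strip()
--     if start not in graph:
--         return None
--     shortest_path = None
--     for node in graph[start]:
--         if node not in path:
--             new_path = dfs(graph, node, end, path)
--             if new_path:
--                 if not shortest_path or len(new_path) < len(shortest_path):
--                     shortest_path = new_path
--     return shortest_path
-- ===== SOURCE B (Python) =====
-- def dfs(graph, start, end, path=""):
--     path += start + " "
--     if start == end:
--         return path.strip()
--     if start not in graph: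
--         return None
--     shortest_path = None
--     stack = [(g, path) for g in reversed(graph[start]) if g not in path]
--     while stack:
--         node, cur = stack.pop()
--         new = cur + node + " "
--         if node == end:
--             cand = new.strip()
--             if cand and (shortest_path is None or len(cand) < len(shortest_path)):
--                 shortest_path = cand
--             continue
--         if node not in graph:
--             continue
--         stack.extend((g, new) for g in reversed(graph[node]) if g not in new)
--     return shortest_path
-- ===== Notes on version B (the rewrite author's own statement) =====
-- stated objective: alternative
-- what changed: Replaces A's recursive DFS (each call folds its children's results into a local shortest and returns it up the call chain) with an explicit stack of (node, path) frames and a single global shortest-path accumulator updated at end-hits in DFS completion order.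
import Mathlib
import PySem

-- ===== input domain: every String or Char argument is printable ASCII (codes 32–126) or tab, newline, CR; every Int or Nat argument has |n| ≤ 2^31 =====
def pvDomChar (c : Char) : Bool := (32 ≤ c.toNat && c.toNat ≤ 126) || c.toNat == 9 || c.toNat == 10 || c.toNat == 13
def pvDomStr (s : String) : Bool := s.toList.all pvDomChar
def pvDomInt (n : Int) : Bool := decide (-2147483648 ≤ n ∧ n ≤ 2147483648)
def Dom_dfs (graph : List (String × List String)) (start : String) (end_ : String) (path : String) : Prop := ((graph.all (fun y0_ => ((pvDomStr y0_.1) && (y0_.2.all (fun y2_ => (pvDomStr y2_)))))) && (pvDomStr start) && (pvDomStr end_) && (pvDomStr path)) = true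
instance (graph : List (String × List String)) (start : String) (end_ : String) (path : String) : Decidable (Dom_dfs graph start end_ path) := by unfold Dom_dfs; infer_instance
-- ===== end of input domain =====

-- B replaces A's recursive DFS (local shortest folded up through the returns) by an explicit
-- stack of (node, path) frames with one global shortest-path accumulator, same cost (objective: alternative).

-- Termination infrastructure shared by both ports (cited by name in decreasing_by):
-- pvMu counts the candidate strings (graph values plus the listed extras) that are nonempty
-- and not yet a substring of the accumulated path; it strictly drops at every recursive call.
def pvVals (graph : List (String × List String)) : List String := graph.flatMap Prod.snd

def pvMu (graph : List (String × List String)) (extra : List String) (p : String) : Nat :=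
  ((pvVals graph ++ extra).toFinset.filter
    (fun g => g ≠ "" ∧ ¬ (g.toList <:+: p.toList))).card

lemma pvMu_mono (graph : List (String × List String)) (e1 e2 : List String) (p : String)
    (h : ∀ x ∈ e1, x ∈ pvVals graph ++ e2) : pvMu graph e1 p ≤ pvMu graph e2 p := by
  apply Finset.card_le_card
  intro x hx
  simp only [Finset.mem_filter, List.mem_toFinset, List.mem_append] at *
  rcases hx with ⟨hm, hc⟩
  refine ⟨?_, hc⟩
  rcases hm with hv | he
  · exact Or.inl hv
  · simpa using h x (by simp [he])

lemma pvMu_lt (graph : List (String × List String)) (g p : String) (extra : List String)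
    (hg : g ∈ pvVals graph ++ extra)
    (hfil : PySem.Chars.isIn g.toList p.toList = false) :
    pvMu graph [g] (p ++ g ++ " ") < pvMu graph extra p := by
  have hginf : ¬ (g.toList <:+: p.toList) := (PySem.Chars.isIn_eq_false_iff _ _).1 hfil
  have hgne : g ≠ "" := by
    intro hE; subst hE
    rw [show ("" : String).toList = [] from rfl, PySem.Chars.isIn_nil] at hfil
    simp at hfil
  apply Finset.card_lt_card
  constructor
  · intro x hx
    simp only [Finset.mem_filter, List.mem_toFinset, List.mem_append] at *
    rcases hx with ⟨hm, hne, hinf⟩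
    refine ⟨?_, hne, ?_⟩
    · rcases hm with hv | he
      · exact Or.inl hv
      · simp only [List.mem_singleton] at he; subst he; simpa using hg
    · intro hI
      exact hinf (by
        rw [String.toList_append, String.toList_append]
        exact List.infix_append_of_infix_left (List.infix_append_of_infix_left hI))
  · intro hsub
    have hgIn : g ∈ (pvVals graph ++ extra).toFinset.filter
        (fun g' => g' ≠ "" ∧ ¬ (g'.toList <:+: p.toList)) := by
      simp only [Finset.mem_filter, List.mem_toFinset]
      exact ⟨hg, hgne, hginf⟩
    have := hsub hgIn
    simp only [Finset.mem_filter, List.mem_toFinset] at this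
    exact this.2.2 (by
      rw [String.toList_append, String.toList_append]
      exact List.infix_append (p.toList) (g.toList) (" ".toList))

lemma pvGetD_sublist (graph : List (String × List String)) (k : String) :
    ((PySem.Dict.mk graph).getD k []).Sublist (pvVals graph) := by
  rw [PySem.Dict.getD]
  rcases hf : (PySem.Dict.mk graph).get? k with _ | l
  · simp
  · simp only [Option.getD_some]
    rw [PySem.Dict.get?] at hf
    rcases hm : (List.find? (fun p => p.1 == k) (PySem.Dict.mk graph).items) with _ | q
    · rw [hm] at hf; simp at hf
    · rw [hm] at hf; simp at hf
      have hq : q ∈ graph := List.mem_of_find?_eq_some hm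
      have : q.2 ∈ graph.map Prod.snd := List.mem_map_of_mem hq
      subst hf
      rw [pvVals, List.flatMap_def]
      exact List.sublist_flatten_of_mem this

-- weight of one stack frame for B's loop termination
def pvK (graph : List (String × List String)) : Nat := (pvVals graph).length + 2

def pvW (graph : List (String × List String)) (f : String × String) : Nat :=
  pvK graph ^ pvMu graph [f.1] (f.2 ++ f.1 ++ " ")

lemma pvW_pos (graph : List (String × List String)) (f : String × String) :
    0 < pvW graph f := Nat.pow_pos (by simp [pvK])

lemma pvPush_lt (graph : List (String × List String)) (node new g : String)
    (hmem : g ∈ ((PySem.Dict.mk graph).getD node []).filter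
      (fun g' => !(PySem.Str.isIn g' new))) :
    pvMu graph [g] (new ++ g ++ " ") < pvMu graph [node] new := by
  obtain ⟨hm, hf⟩ := List.mem_filter.1 hmem
  have hfin : PySem.Chars.isIn g.toList new.toList = false := by
    have : PySem.Str.isIn g new = false := by simpa using hf
    simpa [PySem.Str.isIn] using this
  exact pvMu_lt graph g new [node]
    (List.mem_append.2 (Or.inl ((pvGetD_sublist graph node).subset hm))) hfin

lemma pvPush_sum_lt (graph : List (String × List String)) (node cur : String) :
    (((((PySem.Dict.mk graph).getD node []).filter
        (fun g => !(PySem.Str.isIn g (cur ++ node ++ " ")))).map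
          (fun g => (g, cur ++ node ++ " "))).map (pvW graph)).sum
      < pvW graph (node, cur) := by
  have hW : pvW graph (node, cur) = pvK graph ^ pvMu graph [node] (cur ++ node ++ " ") := rfl
  have hKpos : 2 ≤ pvK graph := by simp [pvK]
  rcases hfe : ((PySem.Dict.mk graph).getD node []).filter
      (fun g => !(PySem.Str.isIn g (cur ++ node ++ " "))) with _ | ⟨g0, tl⟩
  · simpa [hfe, hW] using Nat.pow_pos (by omega)
  · rw [← hfe]
    have hg0 : g0 ∈ ((PySem.Dict.mk graph).getD node []).filter
        (fun g => !(PySem.Str.isIn g (cur ++ node ++ " "))) := by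
      rw [hfe]; exact List.mem_cons_self
    have hμpos : 1 ≤ pvMu graph [node] (cur ++ node ++ " ") := by
      have := pvPush_lt graph node (cur ++ node ++ " ") g0 hg0; omega
    set μ0 := pvMu graph [node] (cur ++ node ++ " ") with hmu
    set K := pvK graph with hK
    have hbound : ∀ x ∈ ((((PySem.Dict.mk graph).getD node []).filter
        (fun g => !(PySem.Str.isIn g (cur ++ node ++ " ")))).map
          (fun g => (g, cur ++ node ++ " "))).map (pvW graph), x ≤ K ^ (μ0 - 1) := by
      intro x hx
      simp only [List.map_map, List.mem_map] at hx
      obtain ⟨g, hgfl, rfl⟩ := hx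
      have hlt := pvPush_lt graph node (cur ++ node ++ " ") g hgfl
      have : pvMu graph [g] ((cur ++ node ++ " ") ++ g ++ " ") ≤ μ0 - 1 := by omega
      exact Nat.pow_le_pow_right (by omega) this
    have hsum := List.sum_le_card_nsmul _ _ hbound
    have hlen : (((((PySem.Dict.mk graph).getD node []).filter
        (fun g => !(PySem.Str.isIn g (cur ++ node ++ " ")))).map
          (fun g => (g, cur ++ node ++ " "))).map (pvW graph)).length ≤ K - 2 := by
      simp only [List.length_map]
      have h1 := List.length_filter_le (fun g => !(PySem.Str.isIn g (cur ++ node ++ " ")))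
        ((PySem.Dict.mk graph).getD node [])
      have h2 := (pvGetD_sublist graph node).length_le
      have h3 : K = (pvVals graph).length + 2 := by rw [hK, pvK]
      omega
    have hXpos : 0 < K ^ (μ0 - 1) := Nat.pow_pos (by omega)
    have hs2 : (((((PySem.Dict.mk graph).getD node []).filter
        (fun g => !(PySem.Str.isIn g (cur ++ node ++ " ")))).map
          (fun g => (g, cur ++ node ++ " "))).map (pvW graph)).sum
        ≤ (K - 2) * K ^ (μ0 - 1) :=
      le_trans (by simpa [smul_eq_mul] using hsum) (Nat.mul_le_mul_right _ hlen)
    have hs3 : (K - 2) * K ^ (μ0 - 1) < K * K ^ (μ0 - 1) :=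
      (Nat.mul_lt_mul_right hXpos).2 (by omega)
    have hs4 : K * K ^ (μ0 - 1) = K ^ μ0 := by
      rw [← pow_succ']
      congr 1
      omega
    rw [hW]
    exact lt_of_le_of_lt hs2 (lt_of_lt_of_eq hs3 hs4)

-- ===== PORT A =====
-- A's per-neighbor update: 'if new_path: if not shortest_path or len(new_path) < len(shortest_path): ...'
def pvUpd (sp r : Option String) : Option String :=
  match r with
  | none => sp
  | some t =>
    if t == "" then sp
    else
      match sp with
      | none => some t
      | some s =>
        if s == "" then some t
        else if PySem.Str.len t < PySem.Str.len s then some t else sp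

mutual
-- literal transliteration of A; the 'for node in graph[start]' loop is the helper dfsGo
def dfs (graph : List (String × List String)) (start : String) (end_ : String) (path : String) : Option String :=
  let path2 := path ++ start ++ " "
  if start == end_ then some (PySem.Str.strip path2)
  else if (PySem.Dict.mk graph).contains start = false then none
  else dfsGo graph end_ path2 ((PySem.Dict.mk graph).getD start []) none
termination_by (2 * pvMu graph [start] (path ++ start ++ " ") + 1, 0)
decreasing_by
  apply Prod.Lex.left
  have hle := pvMu_mono graph ((PySem.Dict.mk graph).getD start []) [start] (path ++ start ++ " ")
      (fun x hx => List.mem_append.2 (Or.inl ((pvGetD_sublist graph start).subset hx)))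
  omega

def dfsGo (graph : List (String × List String)) (end_ : String) (path2 : String)
    (nbrs : List String) (sp : Option String) : Option String :=
  match nbrs with
  | [] => sp
  | node :: rest =>
    if PySem.Str.isIn node path2 then dfsGo graph end_ path2 rest sp
    else dfsGo graph end_ path2 rest (pvUpd sp (dfs graph node end_ path2))
termination_by (2 * pvMu graph nbrs path2, nbrs.length)
decreasing_by
  all_goals rename_i h
  all_goals first
  | (apply Prod.Lex.left
     have hfil : PySem.Chars.isIn node.toList path2.toList = false := by
       simp only [PySem.Str.isIn] at h; exact Bool.not_eq_true _ |>.mp h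
     have hlt := pvMu_lt graph node path2 (node :: rest) (by simp) hfil
     omega)
  | (have hle := pvMu_mono graph rest (node :: rest) path2 (by intro x hx; simp [hx])
     rcases Nat.lt_or_eq_of_le hle with h1 | h1
     · apply Prod.Lex.left; omega
     · rw [h1]; exact Prod.Lex.right _ (by simp))
end

-- ===== PORT B =====
-- B's update of the single global shortest path at an end-hit
def pvUpdB (sp : Option String) (cand : String) : Option String :=
  match sp with
  | none => if cand == "" then none else some cand
  | some s =>
    if cand == "" then some s
    else if PySem.Str.len cand < PySem.Str.len s then some cand else some s

-- B's 'while stack' loop; the Lean list head is the top of the Python stack (Python pushes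
-- reversed(...) at the list end and pops from the end, which is prepending in source order here)
def altLoop (graph : List (String × List String)) (end_ : String)
    (stack : List (String × String)) (sp : Option String) : Option String :=
  match stack with
  | [] => sp
  | (node, cur) :: rest =>
    if node == end_ then
      altLoop graph end_ rest (pvUpdB sp (PySem.Str.strip (cur ++ node ++ " ")))
    else if (PySem.Dict.mk graph).contains node = false then
      altLoop graph end_ rest sp
    else
      altLoop graph end_
        (((((PySem.Dict.mk graph).getD node []).filter
            (fun g => !(PySem.Str.isIn g (cur ++ node ++ " ")))).map
              (fun g => (g, cur ++ node ++ " "))) ++ rest) sp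
termination_by (stack.map (pvW graph)).sum
decreasing_by
  · have := pvW_pos graph (node, cur); simp only [List.map_cons, List.sum_cons]; omega
  · have := pvW_pos graph (node, cur); simp only [List.map_cons, List.sum_cons]; omega
  · have := pvPush_sum_lt graph node cur
    simp only [List.map_cons, List.sum_cons, List.map_append, List.sum_append]
    omega

def dfs_alt (graph : List (String × List String)) (start : String) (end_ : String) (path : String) : Option String :=
  let path2 := path ++ start ++ " "
  if start == end_ then some (PySem.Str.strip path2)
  else if (PySem.Dict.mk graph).contains start = false then none
  else altLoop graph end_
    ((((PySem.Dict.mk graph).getD start []).filter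
        (fun g => !(PySem.Str.isIn g path2))).map (fun g => (g, path2))) none

-- ===== PRECONDITION & SPEC =====
def Spec_dfs (graph : List (String × List String)) (start : String) (end_ : String) (path : String) (out : Option String) : Prop := out = dfs_alt graph start end_ path
instance (graph : List (String × List String)) (start : String) (end_ : String) (path : String) (out : Option String) : Decidable (Spec_dfs graph start end_ path out) := by unfold Spec_dfs; infer_instance

-- ===== CLAIM (what is proved, stated in full; the proofs are below) =====
def Claim_equal_dfs : Prop := ∀ (graph : List (String × List String)) (start : String) (end_ : String) (path : String), Dom_dfs graph start end_ path → Spec_dfs graph start end_ path (dfs graph start end_ path)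

-- ===== LEMMAS AND PROOFS =====

-- A's loop equals a fold of pvUpd over the recursive results of the kept neighbors
lemma dfsGo_eq_foldl (graph : List (String × List String)) (end_ p2 : String) :
    ∀ (nbrs : List String) (sp : Option String),
    dfsGo graph end_ p2 nbrs sp
      = ((nbrs.filter (fun g => !(PySem.Str.isIn g p2))).map
          (fun g => dfs graph g end_ p2)).foldl pvUpd sp := by
  intro nbrs
  induction nbrs with
  | nil => intro sp; rw [dfsGo]; simp
  | cons n rest ih =>
    intro sp
    rw [dfsGo]
    by_cases h : PySem.Chars.isIn n.toList p2.toList = true <;>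
      simp [PySem.Str.isIn, h, ih]

lemma pvUpd_ne (sp r : Option String) (h : sp ≠ some "") : pvUpd sp r ≠ some "" := by
  rcases r with _ | t
  · exact h
  · by_cases ht : t = ""
    · subst ht; simpa [pvUpd] using h
    · rcases sp with _ | s
      · simp [pvUpd, ht]
      · simp only [pvUpd, beq_iff_eq, if_neg ht]
        split_ifs <;> simp_all

lemma pvUpdB_ne (sp : Option String) (c : String) (h : sp ≠ some "") : pvUpdB sp c ≠ some "" := by
  rcases sp with _ | s
  · by_cases hc : c = "" <;> simp [pvUpdB, hc]
  · have hs : s ≠ "" := fun e => h (by rw [e])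
    by_cases hc : c = ""
    · simpa [pvUpdB, hc] using h
    · simp only [pvUpdB, beq_iff_eq, if_neg hc]
      split_ifs <;> simp_all

lemma pvUpd_eq_updB (sp : Option String) (t : String) (h : sp ≠ some "") :
    pvUpd sp (some t) = pvUpdB sp t := by
  rcases sp with _ | s
  · simp [pvUpd, pvUpdB]
  · have hs : s ≠ "" := fun e => h (by rw [e])
    simp only [pvUpd, pvUpdB, beq_iff_eq, if_neg hs]

lemma pvUpd_assoc (r m sp : Option String) (hsp : sp ≠ some "") (hm : m ≠ some "") :
    pvUpd (pvUpd sp r) m = pvUpd sp (pvUpd (pvUpd none r) m) := by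
  rcases r with _ | t <;> rcases m with _ | u <;> rcases sp with _ | s <;>
    simp_all [pvUpd, beq_iff_eq]
  all_goals (try (split_ifs <;> simp_all))
  all_goals (try (split_ifs <;> simp_all))
  all_goals (try (split_ifs <;> simp_all))
  all_goals omega

lemma foldl_pvUpd_ne (rs : List (Option String)) (sp : Option String) (h : sp ≠ some "") :
    rs.foldl pvUpd sp ≠ some "" := by
  induction rs generalizing sp with
  | nil => exact h
  | cons r rs ih => exact ih _ (pvUpd_ne _ _ h)

-- the global accumulator can be split off the front of a fold of candidates
lemma foldl_pvUpd_split (rs : List (Option String)) (sp : Option String) (h : sp ≠ some "") :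
    rs.foldl pvUpd sp = pvUpd sp (rs.foldl pvUpd none) := by
  induction rs generalizing sp with
  | nil => simp [pvUpd]
  | cons r rs ih =>
    simp only [List.foldl_cons]
    rw [ih _ (pvUpd_ne _ _ h), ih _ (pvUpd_ne _ _ (by simp))]
    exact pvUpd_assoc r _ sp h (foldl_pvUpd_ne rs none (by simp))

-- main simulation: processing a block of frames equals folding A's recursive results into sp
lemma altLoop_eq (graph : List (String × List String)) (end_ : String) :
    ∀ (m : Nat) (frames rest : List (String × String)) (sp : Option String),
    (∀ f ∈ frames, pvMu graph [f.1] (f.2 ++ f.1 ++ " ") < m) → sp ≠ some "" →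
    altLoop graph end_ (frames ++ rest) sp
      = altLoop graph end_ rest
          (frames.foldl (fun s f => pvUpd s (dfs graph f.1 end_ f.2)) sp) := by
  intro m
  induction m with
  | zero =>
    intro frames rest sp hb hsp
    cases frames with
    | nil => simp
    | cons f fr => exact absurd (hb f List.mem_cons_self) (Nat.not_lt_zero _)
  | succ m ih =>
    intro frames
    induction frames with
    | nil => intro rest sp hb hsp; simp
    | cons f fr ihf =>
      intro rest sp hb hsp
      obtain ⟨node, cur⟩ := f
      have hbfr : ∀ f ∈ fr, pvMu graph [f.1] (f.2 ++ f.1 ++ " ") < m + 1 :=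
        fun f hf => hb f (List.mem_cons_of_mem _ hf)
      rw [List.cons_append, altLoop]
      by_cases hend : (node == end_) = true
      · rw [if_pos hend]
        have hdfs : dfs graph node end_ cur
            = some (PySem.Str.strip (cur ++ node ++ " ")) := by
          rw [dfs.eq_def]; simp only []; rw [if_pos hend]
        rw [ihf rest (pvUpdB sp (PySem.Str.strip (cur ++ node ++ " "))) hbfr
              (pvUpdB_ne sp _ hsp)]
        simp only [List.foldl_cons]
        rw [hdfs, pvUpd_eq_updB sp _ hsp]
      · rw [if_neg hend]
        by_cases hc : (PySem.Dict.mk graph).contains node = false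
        · rw [if_pos hc]
          have hdfs : dfs graph node end_ cur = none := by
            rw [dfs.eq_def]; simp only []; rw [if_neg hend, if_pos hc]
          rw [ihf rest sp hbfr hsp]
          simp only [List.foldl_cons]
          rw [hdfs]
          rfl
        · rw [if_neg hc]
          have hbp : ∀ f ∈ (((PySem.Dict.mk graph).getD node []).filter
              (fun g => !(PySem.Str.isIn g (cur ++ node ++ " ")))).map
                (fun g => (g, cur ++ node ++ " ")),
              pvMu graph [f.1] (f.2 ++ f.1 ++ " ") < m := by
            intro f hf
            obtain ⟨g, hg, rfl⟩ := List.mem_map.1 hf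
            have h1 := pvPush_lt graph node (cur ++ node ++ " ") g hg
            have h2 : pvMu graph [node] (cur ++ node ++ " ") < m + 1 :=
              hb (node, cur) List.mem_cons_self
            exact lt_of_lt_of_le h1 (Nat.lt_succ_iff.mp h2)
          rw [ih _ (fr ++ rest) sp hbp hsp]
          have hrw : ((((PySem.Dict.mk graph).getD node []).filter
              (fun g => !(PySem.Str.isIn g (cur ++ node ++ " ")))).map
                (fun g => (g, cur ++ node ++ " "))).foldl
                  (fun s f => pvUpd s (dfs graph f.1 end_ f.2)) sp
              = ((((PySem.Dict.mk graph).getD node []).filter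
                  (fun g => !(PySem.Str.isIn g (cur ++ node ++ " ")))).map
                    (fun g => dfs graph g end_ (cur ++ node ++ " "))).foldl pvUpd sp := by
            rw [List.foldl_map, List.foldl_map]
          have hdfs : dfs graph node end_ cur
              = dfsGo graph end_ (cur ++ node ++ " ")
                  ((PySem.Dict.mk graph).getD node []) none := by
            rw [dfs.eq_def]; simp only []; rw [if_neg hend, if_neg hc]
          have hX : ((((PySem.Dict.mk graph).getD node []).filter
              (fun g => !(PySem.Str.isIn g (cur ++ node ++ " ")))).map
                (fun g => (g, cur ++ node ++ " "))).foldl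
                  (fun s f => pvUpd s (dfs graph f.1 end_ f.2)) sp
              = pvUpd sp (dfs graph node end_ cur) := by
            rw [hrw, foldl_pvUpd_split _ sp hsp, hdfs, dfsGo_eq_foldl]
          have hne : ((((PySem.Dict.mk graph).getD node []).filter
              (fun g => !(PySem.Str.isIn g (cur ++ node ++ " ")))).map
                (fun g => (g, cur ++ node ++ " "))).foldl
                  (fun s f => pvUpd s (dfs graph f.1 end_ f.2)) sp ≠ some "" := by
            rw [hrw]; exact foldl_pvUpd_ne _ _ hsp
          rw [ihf rest _ hbfr hne]
          simp only [List.foldl_cons]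
          rw [hX]

-- ===== VERDICT (by name: the statement is the Claim_ definition above) =====
theorem dfs_spec : Claim_equal_dfs := by
  intro graph start end_ path _hdom
  unfold Spec_dfs dfs_alt
  rw [dfs.eq_def]
  by_cases hend : (start == end_) = true
  · simp only [if_pos hend]
  · simp only [if_neg hend]
    by_cases hc : (PySem.Dict.mk graph).contains start = false
    · simp only [if_pos hc]
    · simp only [if_neg hc]
      have hb : ∀ f ∈ (((PySem.Dict.mk graph).getD start []).filter
          (fun g => !(PySem.Str.isIn g (path ++ start ++ " ")))).map
            (fun g => (g, path ++ start ++ " ")),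
          pvMu graph [f.1] (f.2 ++ f.1 ++ " ") < pvMu graph [start] (path ++ start ++ " ") := by
        intro f hf
        obtain ⟨g, hg, rfl⟩ := List.mem_map.1 hf
        exact pvPush_lt graph start (path ++ start ++ " ") g hg
      have h0 := altLoop_eq graph end_ (pvMu graph [start] (path ++ start ++ " "))
          ((((PySem.Dict.mk graph).getD start []).filter
            (fun g => !(PySem.Str.isIn g (path ++ start ++ " ")))).map
              (fun g => (g, path ++ start ++ " "))) [] none hb (by simp)
      rw [List.append_nil] at h0
      rw [h0, altLoop, dfsGo_eq_foldl, List.foldl_map, List.foldl_map]
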